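-- pv_equiv track=rewrite | github.com/GregLefebvre/gamify_life | main.py | alphabetically_order_cat
-- ===== SOURCE A (Python) =====
-- def encode_cesar(string, decalage):
--     minusules = "abcdefghijklmnopqrstuvwxyz"
--     majuscules = "ABCDEFGHIJKLMNOPQRSTUVWXYZ"
--     res = ""
--     for letter in string:
--         if letter in minusules:
--             ind = minusules.index(letter)
--             ind = (ind+decalage)%26
--             res_letter = minusules[ind]
--         elif letter in majuscules:
--             ind = majuscules.index(letter)
--             ind = (ind+decalage)%26
--             res_letter = majuscules[ind]
--         else:
--             res_letter = letter
--         res = res+res_letter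
--     return res
--
-- def decode_cesar(string, decalage):
--     return encode_cesar(string, -decalage)
--
-- def alphabetically_order_cat(cats):
--     cats_names = cats.keys()
--     cats_names_decoded = list()
--     for cat_name in cats_names:
--         cats_names_decoded.append(decode_cesar(cat_name, 10))
--     cats_names_decoded = sorted(cats_names_decoded)
--     sorted_cats = dict()
--     for sorted_cat_name in cats_names_decoded:
--         for cat_name in cats:
--             if decode_cesar(cat_name, 10) == sorted_cat_name:
--                 sorted_cats[encode_cesar(sorted_cat_name, 10)] = cats[cat_name]
--     return sorted_cats
-- ===== SOURCE B (Python) =====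
-- _LOWER = "abcdefghijklmnopqrstuvwxyz"
-- _UPPER = "ABCDEFGHIJKLMNOPQRSTUVWXYZ"
-- # decoding by shift 10 maps each letter 16 places forward: build the table once
-- _DEC10 = str.maketrans(_LOWER + _UPPER,
--                        _LOWER[16:] + _LOWER[:16] + _UPPER[16:] + _UPPER[:16])
--
-- def alphabetically_order_cat(cats):
--     return dict(sorted(cats.items(), key=lambda kv: kv[0].translate(_DEC10)))
-- ===== Notes on version B (the rewrite author's own statement) =====
-- stated objective: faster
-- what changed: B decodes keys via a translation table built once and does a single stable sort of the items by decoded key (using encode(decode(k))=k so keys need no re-encoding), replacing A's per-character alphabet scans and its quadratic rescan of all keys for every sorted decoded name.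
import Mathlib
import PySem

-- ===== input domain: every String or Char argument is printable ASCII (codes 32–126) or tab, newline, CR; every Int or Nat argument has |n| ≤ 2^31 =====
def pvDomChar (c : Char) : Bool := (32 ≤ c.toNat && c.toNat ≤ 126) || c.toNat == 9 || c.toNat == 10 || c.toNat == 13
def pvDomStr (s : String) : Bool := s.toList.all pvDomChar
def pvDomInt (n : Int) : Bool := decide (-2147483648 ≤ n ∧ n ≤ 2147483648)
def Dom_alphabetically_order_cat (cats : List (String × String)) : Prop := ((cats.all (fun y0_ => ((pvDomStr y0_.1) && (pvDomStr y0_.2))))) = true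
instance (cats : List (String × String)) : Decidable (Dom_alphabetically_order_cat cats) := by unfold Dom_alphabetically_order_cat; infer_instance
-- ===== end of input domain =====

-- B replaces A's quadratic sorted-name × key rescan by one stable sort of the items keyed
-- by a table-driven Caesar decode (faster, asymptotic in a timing run).

-- ===== PORT A =====
def pvMinus : List Char := "abcdefghijklmnopqrstuvwxyz".toList
def pvMajus : List Char := "ABCDEFGHIJKLMNOPQRSTUVWXYZ".toList

-- one iteration of encode_cesar's letter loop (membership test, .index, (i+d)%26, re-index)
def encodeCesarChar (d : Int) (c : Char) : Char :=
  if c ∈ pvMinus then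
    match PySem.List.index? pvMinus c with
    | some i => (PySem.List.pyGet? pvMinus (PySem.Int.mod ((i : Int) + d) 26)).getD c
    | none => c
  else if c ∈ pvMajus then
    match PySem.List.index? pvMajus c with
    | some i => (PySem.List.pyGet? pvMajus (PySem.Int.mod ((i : Int) + d) 26)).getD c
    | none => c
  else c

def encode_cesar (s : String) (d : Int) : String :=
  String.ofList (s.toList.foldl (fun res c => res ++ [encodeCesarChar d c]) [])

def decode_cesar (s : String) (d : Int) : String := encode_cesar s (-d)

def alphabetically_order_cat (cats : List (String × String)) : List (String × String) :=
  let catsD := PySem.Dict.mk cats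
  let catsNamesDecoded := cats.map (fun kv => decode_cesar kv.1 10)
  let sortedNames := PySem.List.sorted catsNamesDecoded (fun s => s)
  let sortedCats := sortedNames.foldl (fun acc s =>
    cats.foldl (fun acc2 kv =>
      if decode_cesar kv.1 10 = s then
        match catsD.get? kv.1 with
        | some v => acc2.insert (encode_cesar s 10) v
        | none => acc2
      else acc2) acc) PySem.Dict.empty
  sortedCats.items

-- ===== PORT B =====
-- Source B's translation table: LOWER+UPPER ↦ LOWER[16:]+LOWER[:16]+UPPER[16:]+UPPER[:16]
def pvDecTable : PySem.Dict Char Char :=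
  PySem.Dict.ofList ((pvMinus ++ pvMajus).zip
    ((pvMinus.drop 16 ++ pvMinus.take 16) ++ (pvMajus.drop 16 ++ pvMajus.take 16)))

-- str.translate: map each char through the table, identity where absent
def pvTranslate (s : String) : String :=
  String.ofList (s.toList.map (fun c => (pvDecTable.get? c).getD c))

def alphabetically_order_cat_alt (cats : List (String × String)) : List (String × String) :=
  PySem.List.sorted cats (fun kv => pvTranslate kv.1)

-- ===== PRECONDITION & SPEC =====
-- Pre_ only rules out association lists with duplicate keys: a Python dict can never
-- contain two equal keys, so such lists represent no input of the Python function.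
def Pre_alphabetically_order_cat (cats : List (String × String)) : Prop :=
  (cats.map Prod.fst).Nodup
instance (cats : List (String × String)) : Decidable (Pre_alphabetically_order_cat cats) := by
  unfold Pre_alphabetically_order_cat; infer_instance

def pvWitness_alphabetically_order_cat : (List (String × String)) :=
  [("Zkfyd", "sport"), ("Rozy", "food")]

def Spec_alphabetically_order_cat (cats : List (String × String)) (out : List (String × String)) : Prop := out = alphabetically_order_cat_alt cats
instance (cats : List (String × String)) (out : List (String × String)) : Decidable (Spec_alphabetically_order_cat cats out) := by unfold Spec_alphabetically_order_cat; infer_instance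

-- ===== CLAIM (what is proved, stated in full; the proofs are below) =====
def Claim_equal_alphabetically_order_cat : Prop := ∀ (cats : List (String × String)), Dom_alphabetically_order_cat cats → Pre_alphabetically_order_cat cats → Spec_alphabetically_order_cat cats (alphabetically_order_cat cats)

-- ===== LEMMAS AND PROOFS =====

-- the two character maps agree: B's table lookup is A's index-shift-reindex at d = -10
set_option maxRecDepth 8192 in
lemma decChar_eq (c : Char) :
    (pvDecTable.get? c).getD c = encodeCesarChar (-10) c := by
  by_cases h1 : c ∈ pvMinus
  · exact eq_of_beq (List.all_eq_true.mp
      (by decide : pvMinus.all (fun c => (pvDecTable.get? c).getD c == encodeCesarChar (-10) c) = true) c h1)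
  · by_cases h2 : c ∈ pvMajus
    · exact eq_of_beq (List.all_eq_true.mp
        (by decide : pvMajus.all (fun c => (pvDecTable.get? c).getD c == encodeCesarChar (-10) c) = true) c h2)
    · have hk : pvDecTable.keys = pvMinus ++ pvMajus := by decide
      have hnone : pvDecTable.get? c = none := by
        rw [PySem.Dict.get?_eq_none_iff_not_mem_keys, hk]
        simp [h1, h2]
      simp [hnone, encodeCesarChar, h1, h2]

-- shifting back by 10 undoes the shift by -10, character-wise
set_option maxRecDepth 8192 in
lemma enc_dec_char (c : Char) :
    encodeCesarChar 10 (encodeCesarChar (-10) c) = c := by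
  by_cases h1 : c ∈ pvMinus
  · exact eq_of_beq (List.all_eq_true.mp
      (by decide : pvMinus.all (fun c => encodeCesarChar 10 (encodeCesarChar (-10) c) == c) = true) c h1)
  · by_cases h2 : c ∈ pvMajus
    · exact eq_of_beq (List.all_eq_true.mp
        (by decide : pvMajus.all (fun c => encodeCesarChar 10 (encodeCesarChar (-10) c) == c) = true) c h2)
    · simp [encodeCesarChar, h1, h2]

lemma encode_eq_map (s : String) (d : Int) :
    encode_cesar s d = String.ofList (s.toList.map (encodeCesarChar d)) := by
  simp only [encode_cesar]
  rw [PySem.List.foldl_append_singleton_eq_map]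
  simp

lemma translate_eq_decode (s : String) :
    pvTranslate s = decode_cesar s 10 := by
  simp only [pvTranslate, decode_cesar, encode_eq_map]
  exact congrArg String.ofList (List.map_congr_left (fun c _ => decChar_eq c))

lemma enc_dec_str (s : String) :
    encode_cesar (decode_cesar s 10) 10 = s := by
  simp [decode_cesar, encode_eq_map, List.map_map, Function.comp_def, enc_dec_char]

lemma dec_injective : Function.Injective (fun s => decode_cesar s 10) := by
  intro a b h
  have := congrArg (fun t => encode_cesar t 10) h
  simpa [enc_dec_str] using this

-- A's inner loop body, abbreviated for the loop lemmas below
def pvStep (cats : List (String × String)) (s : String)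
    (acc2 : PySem.Dict String String) (kv : String × String) : PySem.Dict String String :=
  if decode_cesar kv.1 10 = s then
    match (PySem.Dict.mk cats).get? kv.1 with
    | some v => acc2.insert (encode_cesar s 10) v
    | none => acc2
  else acc2

-- inner loop of A, no key of l matches k: the accumulator is untouched
lemma inner_none (cats : List (String × String)) (k : String)
    (l : List (String × String)) (hl : ∀ kv ∈ l, kv.1 ≠ k)
    (acc : PySem.Dict String String) :
    l.foldl (pvStep cats (decode_cesar k 10)) acc = acc := by
  induction l generalizing acc with
  | nil => rfl
  | cons p t ih =>
    have hp : p.1 ≠ k := hl p (by simp)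
    have hcond : ¬ decode_cesar p.1 10 = decode_cesar k 10 := fun h => hp (dec_injective h)
    rw [List.foldl_cons, pvStep, if_neg hcond]
    exact ih (fun kv hkv => hl kv (by simp [hkv])) acc

-- inner loop of A over a sublist l of cats containing (k,v), keys of l distinct:
-- exactly one insert happens, of (k, v)
lemma inner_main (cats : List (String × String)) (hnd : (cats.map Prod.fst).Nodup)
    (k v : String) (hkv : (k, v) ∈ cats)
    (l : List (String × String))
    (hndl : (l.map Prod.fst).Nodup) (hmem : (k, v) ∈ l)
    (acc : PySem.Dict String String) :
    l.foldl (pvStep cats (decode_cesar k 10)) acc = acc.insert k v := by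
  induction l generalizing acc with
  | nil => simp at hmem
  | cons p t ih =>
    rw [List.map_cons, List.nodup_cons] at hndl
    by_cases hp : p.1 = k
    · have hpt : p = (k, v) := by
        rcases List.mem_cons.mp hmem with h | h
        · exact h.symm
        · exfalso
          have hk : k ∈ t.map Prod.fst := List.mem_map.mpr ⟨(k, v), h, rfl⟩
          rw [hp] at hndl
          exact hndl.1 hk
      subst hpt
      have hget : (PySem.Dict.mk cats).get? k = some v :=
        PySem.Dict.get?_of_mem_items (PySem.Dict.mk cats) hkv hnd
      rw [List.foldl_cons, pvStep]
      rw [if_pos rfl, hget, enc_dec_str]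
      exact inner_none cats k t
        (fun kv hkvt h => hndl.1 (h ▸ List.mem_map.mpr ⟨kv, hkvt, rfl⟩)) _
    · have hcond : ¬ decode_cesar p.1 10 = decode_cesar k 10 := fun h => hp (dec_injective h)
      rw [List.foldl_cons, pvStep, if_neg hcond]
      have hmem' : (k, v) ∈ t := by
        rcases List.mem_cons.mp hmem with h | h
        · exact absurd (congrArg Prod.fst h.symm) hp
        · exact h
      exact ih hndl.2 hmem' acc

-- the outer loop over the decoded names of rest is the plain insert loop over rest
lemma outer_loop (cats : List (String × String)) (hnd : (cats.map Prod.fst).Nodup)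
    (rest : List (String × String)) (hsub : ∀ kv ∈ rest, kv ∈ cats)
    (acc : PySem.Dict String String) :
    (rest.map (fun kv => decode_cesar kv.1 10)).foldl (fun acc s =>
      cats.foldl (pvStep cats s) acc) acc
    = rest.foldl (fun a kv => a.insert kv.1 kv.2) acc := by
  induction rest generalizing acc with
  | nil => rfl
  | cons p t ih =>
    rw [List.map_cons, List.foldl_cons, List.foldl_cons]
    rw [inner_main cats hnd p.1 p.2 (hsub p (by simp)) cats hnd
          (by simpa using hsub p (by simp)) acc]
    exact ih (fun kv h => hsub kv (by simp [h])) _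

-- ===== VERDICT (by name: the statement is the Claim_ definition above) =====
theorem alphabetically_order_cat_spec : Claim_equal_alphabetically_order_cat := by
  intro cats _ hpre
  unfold Spec_alphabetically_order_cat alphabetically_order_cat alphabetically_order_cat_alt
  have hnd : (cats.map Prod.fst).Nodup := hpre
  -- the sort key of B is the decoded key
  have hkey : PySem.List.sorted cats (fun kv => pvTranslate kv.1)
      = PySem.List.sorted cats (fun kv => decode_cesar kv.1 10) := by
    congr 1
    funext kv
    exact translate_eq_decode kv.1
  set B := PySem.List.sorted cats (fun kv => decode_cesar kv.1 10) with hB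
  have hperm : B.Perm cats := PySem.List.sorted_perm cats _ false
  have hndB : (B.map Prod.fst).Nodup := (hperm.map Prod.fst).nodup_iff.mpr hnd
  have hndBdec : (B.map (fun kv => decode_cesar kv.1 10)).Nodup := by
    have h : B.map (fun kv => decode_cesar kv.1 10)
        = (B.map Prod.fst).map (fun s => decode_cesar s 10) := by
      simp [List.map_map, Function.comp_def]
    rw [h]
    exact hndB.map dec_injective
  -- the sorted decoded names are the decoded keys of B, in order
  have hnames : PySem.List.sorted (cats.map (fun kv => decode_cesar kv.1 10)) (fun s => s)
      = B.map (fun kv => decode_cesar kv.1 10) := by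
    apply PySem.List.sorted_eq_of_perm_of_pairwise_lt
    · exact hperm.map _
    · have hle := PySem.List.sorted_map_key_pairwise cats (fun kv => decode_cesar kv.1 10)
      rw [← hB] at hle
      have hne : (B.map (fun kv => decode_cesar kv.1 10)).Pairwise (· ≠ ·) :=
        List.nodup_iff_pairwise_ne.mp hndBdec
      exact (hle.and hne).imp (fun h => lt_of_le_of_ne h.1 h.2)
  simp only [hkey, hnames]
  have houter := outer_loop cats hnd B (fun kv h => hperm.mem_iff.mp h) PySem.Dict.empty
  have hfresh := PySem.Dict.items_foldl_insert_fresh B Prod.fst Prod.snd PySem.Dict.empty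
    (fun a _ => by simp) hndB
  have hitems : (List.foldl (fun acc s => cats.foldl (pvStep cats s) acc) PySem.Dict.empty
      (B.map (fun kv => decode_cesar kv.1 10))).items = B := by
    rw [houter]
    simpa using hfresh
  exact hitems
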